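-- pv_equiv track=rewrite | github.com/acarrasco/advent_of_code | 2024/day16/part2.py | parse
-- ===== SOURCE A (Python) =====
-- def parse(lines):
--     start = None
--     end = None
--     walls = set()
--     for i, row in enumerate(lines):
--         for j, c in enumerate(row):
--             if c == 'S':
--                 start = i, j
--             elif c == 'E':
--                 end = i, j
--             elif c == '#':
--                 walls.add((i, j))
--     return walls, start, end
-- ===== SOURCE B (Python) =====
-- def parse(lines):
--     cells = [(c, (i, j)) for i, row in enumerate(lines) for j, c in enumerate(row)]
--     walls = {pos for c, pos in cells if c == '#'}
--     markers = {c: pos for c, pos in cells if c in 'SE'}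
--     return walls, markers.get('S'), markers.get('E')
-- ===== Notes on version B (the rewrite author's own statement) =====
-- stated objective: idiomatic
-- what changed: Replaces the triple-state overwrite loop by a flat cells list, a set comprehension for walls and a dict comprehension for the marker positions, read back with dict.get.
import Mathlib
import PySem

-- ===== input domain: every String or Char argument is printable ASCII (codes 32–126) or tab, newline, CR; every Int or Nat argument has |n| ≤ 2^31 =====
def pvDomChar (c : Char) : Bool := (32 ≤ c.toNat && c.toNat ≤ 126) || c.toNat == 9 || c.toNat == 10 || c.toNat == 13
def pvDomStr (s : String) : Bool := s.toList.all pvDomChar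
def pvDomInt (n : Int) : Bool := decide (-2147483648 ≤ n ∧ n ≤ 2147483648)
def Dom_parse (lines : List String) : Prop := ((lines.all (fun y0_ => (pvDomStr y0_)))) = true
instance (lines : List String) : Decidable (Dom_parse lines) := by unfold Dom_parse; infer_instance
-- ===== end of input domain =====

-- B replaces A's triple-state overwrite loop by a flat cells list, a set comprehension
-- for walls and a dict comprehension for the markers (idiomatic decomposition, same cost).

-- ===== PORT A =====
-- literal port of A: one nested loop threading the state (walls, start, end)
def parse (lines : List String) : (List (Int × Int)) × (Option (Int × Int)) × (Option (Int × Int)) :=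
  let st := (PySem.List.enumerate lines 0).foldl
    (fun (acc : (PySem.Set (Int × Int)) × (Option (Int × Int)) × (Option (Int × Int))) ir =>
      (PySem.List.enumerate ir.2.toList 0).foldl
        (fun acc jc =>
          if jc.2 = 'S' then (acc.1, some (ir.1, jc.1), acc.2.2)
          else if jc.2 = 'E' then (acc.1, acc.2.1, some (ir.1, jc.1))
          else if jc.2 = '#' then (PySem.Set.add acc.1 (ir.1, jc.1), acc.2.1, acc.2.2)
          else acc) acc)
    (PySem.Set.empty, none, none)
  (st.1, st.2.1, st.2.2)

-- ===== PORT B =====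
def parse_alt (lines : List String) : (List (Int × Int)) × (Option (Int × Int)) × (Option (Int × Int)) :=
  let cells : List (Char × (Int × Int)) :=
    (PySem.List.enumerate lines 0).flatMap (fun ir =>
      (PySem.List.enumerate ir.2.toList 0).map (fun jc => (jc.2, (ir.1, jc.1))))
  let walls := PySem.Set.ofList ((cells.filter (fun cp => cp.1 == '#')).map (·.2))
  let markers : PySem.Dict Char (Int × Int) :=
    (cells.filter (fun cp => cp.1 == 'S' || cp.1 == 'E')).foldl
      (fun d cp => d.insert cp.1 cp.2) PySem.Dict.empty
  (walls, markers.get? 'S', markers.get? 'E')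

-- ===== PRECONDITION & SPEC =====
def Spec_parse (lines : List String) (out : (List (Int × Int)) × (Option (Int × Int)) × (Option (Int × Int))) : Prop := out = parse_alt lines
instance (lines : List String) (out : (List (Int × Int)) × (Option (Int × Int)) × (Option (Int × Int))) : Decidable (Spec_parse lines out) := by unfold Spec_parse; infer_instance

-- ===== CLAIM =====
def Claim_equal_parse : Prop := ∀ (lines : List String), Dom_parse lines → Spec_parse lines (parse lines)

-- ===== LEMMAS AND PROOFS =====

-- A's loop state
abbrev St := (PySem.Set (Int × Int)) × (Option (Int × Int)) × (Option (Int × Int))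

-- A's per-character step, phrased over a flattened (char, position) cell
def cellStep (acc : St) (cp : Char × (Int × Int)) : St :=
  if cp.1 = 'S' then (acc.1, some cp.2, acc.2.2)
  else if cp.1 = 'E' then (acc.1, acc.2.1, some cp.2)
  else if cp.1 = '#' then (PySem.Set.add acc.1 cp.2, acc.2.1, acc.2.2)
  else acc

-- the flattened cell list B builds (named for the proofs)
def pvCells (lines : List String) : List (Char × (Int × Int)) :=
  (PySem.List.enumerate lines 0).flatMap (fun ir =>
    (PySem.List.enumerate ir.2.toList 0).map (fun jc => (jc.2, (ir.1, jc.1))))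

-- A's nested loop is the fold of cellStep over the flattened cells
lemma parse_eq_cells_fold (lines : List String) :
    parse lines =
      (let st := (pvCells lines).foldl cellStep (PySem.Set.empty, none, none)
       (st.1, st.2.1, st.2.2)) := by
  unfold parse pvCells
  rw [List.foldl_flatMap]
  simp only [List.foldl_map]
  rfl

-- the fold of cellStep, componentwise
lemma cells_fold (cs : List (Char × (Int × Int))) (acc : St) :
    cs.foldl cellStep acc =
      (((cs.filter (fun cp => cp.1 == '#')).map (·.2)).foldl PySem.Set.add acc.1,
       cs.foldl (fun s cp => if cp.1 = 'S' then some cp.2 else s) acc.2.1,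
       cs.foldl (fun s cp => if cp.1 = 'E' then some cp.2 else s) acc.2.2) := by
  induction cs generalizing acc with
  | nil => simp
  | cons hd tl ih =>
    rw [List.foldl_cons, ih, List.filter_cons]
    unfold cellStep
    by_cases hS : hd.1 = 'S'
    · simp [hS]
    · by_cases hE : hd.1 = 'E'
      · simp [hE]
      · by_cases hH : hd.1 = '#'
        · simp [hH]
        · simp [hS, hE, hH]

-- B's marker dict, looked up at k ∈ {'S','E'}, is A's overwrite fold for k
lemma markers_get (k : Char) (hk : k = 'S' ∨ k = 'E')
    (cs : List (Char × (Int × Int))) (d : PySem.Dict Char (Int × Int)) :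
    ((cs.filter (fun cp => cp.1 == 'S' || cp.1 == 'E')).foldl
        (fun d cp => d.insert cp.1 cp.2) d).get? k =
      cs.foldl (fun s cp => if cp.1 = k then some cp.2 else s) (d.get? k) := by
  induction cs generalizing d with
  | nil => simp
  | cons hd tl ih =>
    rw [List.filter_cons, List.foldl_cons]
    by_cases hkhd : hd.1 = k
    · have hin : (hd.1 == 'S' || hd.1 == 'E') = true := by
        rcases hk with h | h <;> simp [hkhd, h]
      rw [if_pos hin, List.foldl_cons, ih, hkhd, PySem.Dict.get?_insert_self]
      simp
    · by_cases hin : (hd.1 == 'S' || hd.1 == 'E') = true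
      · rw [if_pos hin, List.foldl_cons, ih,
            PySem.Dict.get?_insert_of_ne d hd.2 (fun h => hkhd h.symm)]
        simp [hkhd]
      · rw [if_neg hin, ih]
        simp [hkhd]

-- B's result, spelled out in terms of pvCells
lemma parse_alt_eq (lines : List String) :
    parse_alt lines =
      (PySem.Set.ofList (((pvCells lines).filter (fun cp => cp.1 == '#')).map (·.2)),
       (((pvCells lines).filter (fun cp => cp.1 == 'S' || cp.1 == 'E')).foldl
          (fun d cp => d.insert cp.1 cp.2) PySem.Dict.empty).get? 'S',
       (((pvCells lines).filter (fun cp => cp.1 == 'S' || cp.1 == 'E')).foldl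
          (fun d cp => d.insert cp.1 cp.2) PySem.Dict.empty).get? 'E') := rfl

-- ===== VERDICT =====
theorem parse_spec : Claim_equal_parse := by
  intro lines _
  show parse lines = parse_alt lines
  rw [parse_eq_cells_fold, cells_fold, parse_alt_eq]
  refine Prod.ext ?_ (Prod.ext ?_ ?_)
  · exact (PySem.Set.ofList_eq_foldl _).symm
  · rw [markers_get 'S' (Or.inl rfl)]; simp
  · rw [markers_get 'E' (Or.inr rfl)]; simp
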